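-- pv_equiv track=rewrite | github.com/Geoffrey-Hagberg/bookbot | main.py | get_distinct_words
-- ===== SOURCE A (Python) =====
-- def get_distinct_words(word_list):
--     distinct_words = {}
--     for word in word_list:
--         lowered_word = word.lower()
--         if lowered_word in distinct_words:
--             distinct_words[lowered_word] += 1
--         else:
--             distinct_words[lowered_word] = 1
--     return distinct_words
-- ===== SOURCE B (Python) =====
-- def get_distinct_words(word_list):
--     # Alternative decomposition: iterative count-and-remove over the lowered worklist.
--     ws = [w.lower() for w in word_list]
--     result = {}
--     while ws:
--         w, rest = ws[0], ws[1:]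
--         remaining = [x for x in rest if x != w]
--         result[w] = 1 + len(rest) - len(remaining)
--         ws = remaining
--     return result
-- ===== Notes on version B (the rewrite author's own statement) =====
-- stated objective: alternative
-- what changed: Replaces the single-pass dict membership-test/increment accumulation with a count-and-remove worklist: repeatedly take the first lowered word, count it by filtering all its occurrences out of the remaining list, and continue on the filtered remainder.
import Mathlib
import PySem

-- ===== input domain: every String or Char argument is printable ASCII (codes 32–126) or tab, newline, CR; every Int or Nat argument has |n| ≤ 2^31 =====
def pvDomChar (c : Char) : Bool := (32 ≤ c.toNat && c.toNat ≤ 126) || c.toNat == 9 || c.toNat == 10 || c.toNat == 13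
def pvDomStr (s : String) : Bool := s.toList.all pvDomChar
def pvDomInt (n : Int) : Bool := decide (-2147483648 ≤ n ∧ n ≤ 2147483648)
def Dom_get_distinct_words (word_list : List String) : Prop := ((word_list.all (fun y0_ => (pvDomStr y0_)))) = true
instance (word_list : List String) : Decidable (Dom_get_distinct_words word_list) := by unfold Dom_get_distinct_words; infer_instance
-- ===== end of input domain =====

-- B replaces A's dict membership-test/increment accumulation with an iterative
-- count-and-remove worklist over the lowered words (objective: alternative; same results).


-- ===== PORT A =====
def get_distinct_words (word_list : List String) : List (String × Int) :=
  (word_list.foldl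
    (fun distinct_words word =>
      let lowered_word := PySem.Str.lower word
      if distinct_words.contains lowered_word then
        distinct_words.insert lowered_word (distinct_words.getD lowered_word 0 + 1)
      else
        distinct_words.insert lowered_word 1)
    (PySem.Dict.empty : PySem.Dict String Int)).items

-- ===== PORT B =====
-- the 'while ws:' loop of Source B: take the first word, count it by filtering it out, recurse on the remainder
def altLoop (result : List (String × Int)) (ws : List String) : List (String × Int) :=
  match ws with
  | [] => result
  | w :: rest =>
      altLoop
        (result ++ [(w, 1 + ((rest.length : Int) - ((rest.filter (fun x => x != w)).length : Int)))])
        (rest.filter (fun x => x != w))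
termination_by ws.length
decreasing_by
  simp only [List.length_unattach, List.length_cons]
  exact Nat.lt_succ_of_le (le_trans (List.length_filter_le _ _) (le_of_eq List.length_attach))

def get_distinct_words_alt (word_list : List String) : List (String × Int) :=
  altLoop [] (word_list.map PySem.Str.lower)

-- ===== PRECONDITION & SPEC =====
def Spec_get_distinct_words (word_list : List String) (out : List (String × Int)) : Prop := out = get_distinct_words_alt word_list
instance (word_list : List String) (out : List (String × Int)) : Decidable (Spec_get_distinct_words word_list out) := by unfold Spec_get_distinct_words; infer_instance

-- ===== CLAIM (what is proved, stated in full; the proofs are below) =====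
def Claim_equal_get_distinct_words : Prop := ∀ (word_list : List String), Dom_get_distinct_words word_list → Spec_get_distinct_words word_list (get_distinct_words word_list)

-- ===== LEMMAS AND PROOFS =====

-- canonical form both sides reach: distinct lowered words in first-occurrence order, each with its count
lemma discard_eq_filter {α : Type} [BEq α] (s : PySem.Set α) (w : α) :
    PySem.Set.discard s w = s.filter (fun y => y != w) := rfl

lemma ofList_filter {α : Type} [BEq α] [LawfulBEq α] (p : α → Bool) (xs : List α) :
    (PySem.Set.ofList xs).filter p = PySem.Set.ofList (xs.filter p) := by
  induction xs with
  | nil => rfl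
  | cons x xs ih =>
    rw [PySem.Set.ofList_cons, discard_eq_filter, List.filter_cons (xs := xs)]
    by_cases hp : p x = true
    · rw [if_pos hp, PySem.Set.ofList_cons, discard_eq_filter, ← ih, List.filter_cons, if_pos hp]
      rw [List.filter_filter, List.filter_filter]
      congr 1
      apply List.filter_congr
      intro a _
      exact Bool.and_comm _ _
    · rw [if_neg hp, List.filter_cons, if_neg hp, ← ih, List.filter_filter]
      apply List.filter_congr
      intro a _
      cases hpa : p a with
      | false => simp
      | true =>
        have : a ≠ x := fun h => hp (h ▸ hpa)
        simp [this]

lemma count_filter_ne (rest : List String) (w : String) :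
    ((rest.filter (fun x => x != w)).length : Int) + rest.count w = rest.length := by
  induction rest with
  | nil => simp
  | cons x xs ih =>
    simp only [List.filter_cons, List.count_cons, List.length_cons]
    by_cases h : x = w
    · subst h
      simp only [bne_self_eq_false, Bool.false_eq_true, if_false, beq_self_eq_true, if_true]
      push_cast at ih ⊢
      omega
    · have hb : (x != w) = true := by simp [h]
      have hb2 : (x == w) = false := by simp [h]
      simp only [hb, if_true, hb2, Bool.false_eq_true, if_false, List.length_cons]
      push_cast at ih ⊢
      omega

lemma altLoop_eq (acc : List (String × Int)) (ws : List String) :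
    altLoop acc ws = acc ++ (PySem.Set.ofList ws).map (fun k => (k, (ws.count k : Int))) := by
  induction acc, ws using altLoop.induct with
  | case1 acc => simp [altLoop]
  | case2 acc w rest ih =>
    rw [altLoop]
    simp only [List.unattach_filter, List.unattach_attach] at ih
    rw [ih, PySem.Set.ofList_cons, discard_eq_filter, ofList_filter, List.map_cons,
      List.append_assoc, List.singleton_append]
    congr 1
    congr 1
    · -- head entry: the removed count equals the number of occurrences of w
      have h := count_filter_ne rest w
      simp only [List.count_cons_self]
      congr 1
      push_cast
      omega
    · -- tail entries: counts are unchanged by removing the occurrences of w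
      apply List.map_congr_left
      intro k hk
      have hkne : k ≠ w := by
        have := (List.mem_filter.mp ((PySem.Set.mem_ofList _ _).mp hk)).2
        simpa using this
      have h1 : (w :: rest).count k = rest.count k := List.count_cons_of_ne (Ne.symm hkne)
      have h2 : (rest.filter (fun x => x != w)).count k = rest.count k := by
        rw [List.count_filter]
        simp [hkne]
      rw [h1, ← h2]

lemma a_counter (word_list : List String) :
    get_distinct_words word_list
      = (PySem.Dict.counter (word_list.map PySem.Str.lower)).items := by
  unfold get_distinct_words
  have hstep :
      (fun (d : PySem.Dict String Int) (word : String) =>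
        let lowered_word := PySem.Str.lower word
        if d.contains lowered_word then
          d.insert lowered_word (d.getD lowered_word 0 + 1)
        else
          d.insert lowered_word 1)
      = fun (d : PySem.Dict String Int) (word : String) =>
          d.insert (PySem.Str.lower word) (d.getD (PySem.Str.lower word) 0 + 1) := by
    funext d word
    by_cases h : d.contains (PySem.Str.lower word) = true
    · simp [h]
    · have h0 : d.getD (PySem.Str.lower word) 0 = 0 :=
        PySem.Dict.getD_of_not_contains d 0 (by simpa using h)
      simp [h, h0]
  rw [hstep,
    ← List.foldl_map (f := PySem.Str.lower)
      (g := fun (d : PySem.Dict String Int) x => PySem.Dict.insert d x (PySem.Dict.getD d x 0 + 1))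
      (l := word_list) (init := PySem.Dict.empty),
    PySem.Dict.foldl_insert_getD_add_one_eq_counter]

-- ===== VERDICT (by name: the statement is the Claim_ definition above) =====
theorem get_distinct_words_spec : Claim_equal_get_distinct_words := by
  intro wl _
  unfold Spec_get_distinct_words get_distinct_words_alt
  rw [a_counter, PySem.Dict.items_counter, altLoop_eq]
  simp
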